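-- pv_equiv track=rewrite | github.com/XDoodler/Algorithms | running_with_bunnies.py | find_most_bunnies
-- ===== SOURCE A (Python) =====
-- from itertools import permutations
--
-- def allSets(list):
--     x = len(list)
--     m = [1 << i for i in range(x)]
--     for i in range(1 << x):
--         yield [all_ for (mask, all_) in zip(m, list) if i & mask]
--
-- def find_most_bunnies(matrix, spaths, time_limit):
--     n = len(matrix) - 2
--     bunnyids = []
--     for num in range(n):
--         bunnyids.append(num)
--     pset = allSets(bunnyids)
--     pset = sorted(pset)
--     optimal_bunnies = []
--     for sub in pset:
--         for permutation in permutations(sub):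
--             subsum = 0
--             prev = 0
--             next = len(matrix) - 1
--             for bunnyid in permutation:
--                 next = bunnyid + 1
--                 subsum += spaths[prev][next]
--                 prev = next
--             subsum += spaths[prev][len(matrix) - 1]
--             if subsum <= time_limit and len(sub) > len(optimal_bunnies):
--                 optimal_bunnies = sub
--                 if len(optimal_bunnies) == n:
--                     break
--             else:
--                 pass
--     return optimal_bunnies
-- ===== SOURCE B (Python) =====
-- def _splits(rem):
--     # all ways to pick one element of rem: list of (picked, rest) in index order
--     if not rem:
--         return []
--     b, t = rem[0], rem[1:]
--     return [(b, t)] + [(x, [b] + r) for (x, r) in _splits(t)]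
--
--
-- def _best(spaths, end, prev, rem):
--     # minimum travel cost from node prev visiting every bunny in rem, then reaching end
--     if not rem:
--         return spaths[prev][end]
--     return min(spaths[prev][b + 1] + _best(spaths, end, b + 1, r) for (b, r) in _splits(rem))
--
--
-- def find_most_bunnies(matrix, spaths, time_limit):
--     L = len(matrix)
--     n = L - 2
--     if n <= 0:
--         return []
--     best = []
--     for mask in range(1 << n):
--         sub = [b for b in range(n) if (mask >> b) & 1]
--         cost = _best(spaths, L - 1, 0, sub)
--         if cost <= time_limit and (len(sub) > len(best) or (len(sub) == len(best) and sub < best)):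
--             best = sub
--     return best
-- ===== Notes on version B (the rewrite author's own statement) =====
-- stated objective: alternative
-- what changed: B replaces A's sort-all-subsets-then-scan-every-permutation-with-a-max-size-update by a single pass over bitmasks that computes each subset's minimum tour cost with a recursive pick-one-bunny min recursion and keeps the running best under an explicit (larger size, then lexicographically smaller) comparison, so no sorting and no explicit permutation enumeration is needed.
import Mathlib
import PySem

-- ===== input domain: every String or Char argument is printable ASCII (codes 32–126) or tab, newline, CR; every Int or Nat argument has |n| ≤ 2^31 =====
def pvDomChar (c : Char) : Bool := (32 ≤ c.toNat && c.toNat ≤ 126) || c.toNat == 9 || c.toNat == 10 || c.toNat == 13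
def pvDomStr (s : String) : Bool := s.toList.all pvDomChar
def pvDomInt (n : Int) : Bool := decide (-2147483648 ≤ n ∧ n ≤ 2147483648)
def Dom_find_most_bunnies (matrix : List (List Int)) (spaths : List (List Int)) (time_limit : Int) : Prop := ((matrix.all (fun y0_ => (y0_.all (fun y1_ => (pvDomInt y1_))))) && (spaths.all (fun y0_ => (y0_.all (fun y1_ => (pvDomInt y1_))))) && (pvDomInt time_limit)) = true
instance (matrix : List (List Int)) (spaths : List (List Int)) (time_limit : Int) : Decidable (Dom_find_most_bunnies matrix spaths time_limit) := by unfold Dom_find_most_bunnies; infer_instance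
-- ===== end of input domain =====

-- B replaces A's sort-all-subsets + per-permutation scan with one pass over bitmasks, a
-- recursive minimum-tour-cost helper per subset and an explicit (size, then lex) tie-break;
-- equal return values are proved on all inputs where A returns (Pre_), no speed claim.

-- ===== PORT A =====

-- spaths[i][j]; total helper, returns 0 where Python would raise (such inputs are outside Pre_)
def pvAt (spaths : List (List Int)) (i j : Int) : Int :=
  ((PySem.List.pyGet? spaths i).bind (fun r => PySem.List.pyGet? r j)).getD 0

-- generator allSets(list), consumed into a list; Python's ints i, mask are nonnegative,
-- so iterating over Nat (List.range) is exact
def allSets (l : List Int) : List (List Int) :=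
  let x := l.length
  let m := (List.range x).map (fun i => (1 : Nat) <<< i)
  (List.range (1 <<< x)).map
    (fun i => ((m.zip l).filter (fun p => p.1 &&& i != 0)).map (fun p => p.2))

-- the inner 'for permutation in permutations(sub)' loop of A, including the 'break'
-- (Python's dead initialisation 'next = len(matrix) - 1' is overwritten / unused afterwards)
def permLoop (spaths : List (List Int)) (tl L n : Int) (sub : List Int) (acc : List Int) :
    List (List Int) → List Int
  | [] => acc
  | permutation :: ps =>
    let st := permutation.foldl
      (fun (st : Int × Int) bunnyid => (st.1 + pvAt spaths st.2 (bunnyid + 1), bunnyid + 1)) (0, 0)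
    let subsum := st.1 + pvAt spaths st.2 (L - 1)
    if subsum ≤ tl ∧ acc.length < sub.length then
      (if (sub.length : Int) = n then sub else permLoop spaths tl L n sub sub ps)
    else permLoop spaths tl L n sub acc ps

def find_most_bunnies (matrix : List (List Int)) (spaths : List (List Int)) (time_limit : Int) : List Int :=
  let n : Int := (matrix.length : Int) - 2
  let bunnyids : List Int := (PySem.List.pyRange 0 n 1).foldl (fun acc num => acc ++ [num]) []
  let pset := allSets bunnyids
  let psetS := PySem.List.sorted pset (fun s => s)
  psetS.foldl
    (fun acc sub =>
      permLoop spaths time_limit (matrix.length : Int) n sub acc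
        (PySem.List.permutations sub sub.length)) []

-- ===== PORT B =====

-- _splits(rem): all (picked element, rest) pairs, in index order
def pvSplits : List Int → List (Int × List Int)
  | [] => []
  | b :: t => (b, t) :: (pvSplits t).map (fun p => (p.1, b :: p.2))

theorem pvSplits_length {p : Int × List Int} : ∀ {l : List Int}, p ∈ pvSplits l → p.2.length + 1 = l.length := by
  intro l
  induction l generalizing p with
  | nil => intro h; simp [pvSplits] at h
  | cons b t ih =>
    intro h
    simp only [pvSplits, List.mem_cons, List.mem_map] at h
    rcases h with h | ⟨q, hq, rfl⟩
    · subst h; simp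
    · have := ih hq; simp; omega

-- _best(spaths, end, prev, rem); Python's min over a nonempty generator is the running
-- minimum (the [] branch of the inner match is unreachable: pvSplits of a nonempty list is nonempty)
def pvBest (spaths : List (List Int)) (e : Int) (prev : Int) (rem : List Int) : Int :=
  match rem with
  | [] => pvAt spaths prev e
  | x :: t =>
    match (pvSplits (x :: t)).attach.map
        (fun p => pvAt spaths prev (p.1.1 + 1) + pvBest spaths e (p.1.1 + 1) p.1.2) with
    | [] => 0
    | c :: cs => cs.foldl min c
termination_by rem.length
decreasing_by
  have := pvSplits_length p.2
  simp at this ⊢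
  omega

-- the comprehension [b for b in range(n) if (mask >> b) & 1]; mask : Nat is exact
-- (Python's mask is nonnegative), and b ≥ 0 inside range(n) so b.toNat is exact
def pvSubOf (n : Int) (mask : Nat) : List Int :=
  (PySem.List.pyRange 0 n 1).filter (fun b => (mask >>> b.toNat) &&& 1 == 1)

def find_most_bunnies_alt (matrix : List (List Int)) (spaths : List (List Int)) (time_limit : Int) : List Int :=
  let L : Int := (matrix.length : Int)
  let n : Int := L - 2
  if n ≤ 0 then []
  else
    (List.range (1 <<< n.toNat)).foldl
      (fun best mask =>
        let sub := pvSubOf n mask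
        let cost := pvBest spaths (L - 1) 0 sub
        if cost ≤ time_limit ∧ (sub.length > best.length ∨ (sub.length = best.length ∧ sub < best))
        then sub else best) []

-- ===== PRECONDITION & SPEC =====

-- Pre_ holds exactly where the Python A returns: with at least 2 matrix rows it needs the
-- spaths rows 0..len(matrix)-2 to exist with length ≥ len(matrix) (every such entry is read);
-- with 0 or 1 matrix rows A still returns [] provided the single read spaths[0][len(matrix)-1]
-- (index -1 wraps for an empty matrix) succeeds, i.e. the first spaths row exists and is nonempty.
def Pre_find_most_bunnies (matrix : List (List Int)) (spaths : List (List Int)) (time_limit : Int) : Prop :=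
  (2 ≤ matrix.length ∧ matrix.length - 1 ≤ spaths.length ∧
      ∀ r ∈ spaths.take (matrix.length - 1), matrix.length ≤ r.length)
  ∨ (matrix.length ≤ 1 ∧ spaths.headD [] ≠ [])

instance (matrix : List (List Int)) (spaths : List (List Int)) (time_limit : Int) : Decidable (Pre_find_most_bunnies matrix spaths time_limit) := by unfold Pre_find_most_bunnies; infer_instance

def pvWitness_find_most_bunnies : List (List Int) × List (List Int) × Int :=
  ([[0, 0, 0], [0, 0, 0], [0, 0, 0]], ([[0, 1, 1], [1, 0, 1], [1, 1, 0]], 3))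

def Spec_find_most_bunnies (matrix : List (List Int)) (spaths : List (List Int)) (time_limit : Int) (out : List Int) : Prop := out = find_most_bunnies_alt matrix spaths time_limit
instance (matrix : List (List Int)) (spaths : List (List Int)) (time_limit : Int) (out : List Int) : Decidable (Spec_find_most_bunnies matrix spaths time_limit out) := by unfold Spec_find_most_bunnies; infer_instance

-- ===== CLAIM (what is proved, stated in full; the proofs are below) =====
def Claim_equal_find_most_bunnies : Prop := ∀ (matrix : List (List Int)) (spaths : List (List Int)) (time_limit : Int), Dom_find_most_bunnies matrix spaths time_limit → Pre_find_most_bunnies matrix spaths time_limit → Spec_find_most_bunnies matrix spaths time_limit (find_most_bunnies matrix spaths time_limit)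

-- ===== LEMMAS AND PROOFS =====

-- the tour cost of a fixed visiting order (A's subsum computation, written recursively)
def costFn (spaths : List (List Int)) (e : Int) (prev : Int) : List Int → Int
  | [] => pvAt spaths prev e
  | b :: p => pvAt spaths prev (b + 1) + costFn spaths e (b + 1) p

theorem foldcost (spaths : List (List Int)) (e : Int) :
    ∀ (p : List Int) (s prev : Int),
      (p.foldl (fun (st : Int × Int) bunnyid => (st.1 + pvAt spaths st.2 (bunnyid + 1), bunnyid + 1)) (s, prev)).1
        + pvAt spaths (p.foldl (fun (st : Int × Int) bunnyid => (st.1 + pvAt spaths st.2 (bunnyid + 1), bunnyid + 1)) (s, prev)).2 e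
      = s + costFn spaths e prev p := by
  intro p
  induction p with
  | nil => intro s prev; simp [costFn]
  | cons b t ih =>
    intro s prev
    simp only [List.foldl_cons, costFn]
    rw [ih]
    ring

theorem pvSplits_cons_perm : ∀ {l : List Int} {p : Int × List Int}, p ∈ pvSplits l → (p.1 :: p.2).Perm l := by
  intro l
  induction l with
  | nil => intro p h; simp [pvSplits] at h
  | cons b t ih =>
    intro p h
    simp only [pvSplits, List.mem_cons, List.mem_map] at h
    rcases h with h | ⟨q, hq, rfl⟩
    · subst h; exact List.Perm.refl _
    · have := ih hq
      exact List.Perm.trans (List.Perm.swap _ _ _) (List.Perm.cons _ this)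

theorem pvSplits_complete : ∀ {l p' : List Int} {b : Int}, (b :: p').Perm l → ∃ r, (b, r) ∈ pvSplits l ∧ r.Perm p' := by
  intro l
  induction l with
  | nil => intro p' b h; exact absurd (h.length_eq) (by simp)
  | cons x t ih =>
    intro p' b h
    by_cases hbx : b = x
    · subst hbx
      exact ⟨t, by simp [pvSplits], (h.cons_inv).symm⟩
    · have hb : b ∈ x :: t := h.mem_iff.mp (by simp)
      have hbt : b ∈ t := by simpa [hbx] using hb
      have h1 : p'.Perm ((x :: t).erase b) := (List.cons_perm_iff_perm_erase.mp h).2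
      have h2 : (x :: t).erase b = x :: t.erase b := by
        rw [List.erase_cons_tail (by simp; exact fun hx => hbx hx.symm)]
      obtain ⟨r0, hr0, hr0p⟩ := ih (List.perm_cons_erase hbt).symm
      refine ⟨x :: r0, ?_, ?_⟩
      · simp only [pvSplits, List.mem_cons, List.mem_map]
        exact Or.inr ⟨(b, r0), hr0, rfl⟩
      · exact (hr0p.cons x).trans (h2 ▸ h1.symm)

theorem pvSplits_ne_nil (x : Int) (t : List Int) : pvSplits (x :: t) ≠ [] := by
  simp [pvSplits]

theorem pvBest_cons (spaths : List (List Int)) (e prev : Int) (x : Int) (t : List Int) :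
    pvBest spaths e prev (x :: t)
      = match (pvSplits (x :: t)).map (fun p => pvAt spaths prev (p.1 + 1) + pvBest spaths e (p.1 + 1) p.2) with
        | [] => 0
        | c :: cs => cs.foldl min c := by
  rw [pvBest]
  have : (pvSplits (x :: t)).attach.map
      (fun p => pvAt spaths prev (p.1.1 + 1) + pvBest spaths e (p.1.1 + 1) p.1.2)
    = (pvSplits (x :: t)).map (fun p => pvAt spaths prev (p.1 + 1) + pvBest spaths e (p.1 + 1) p.2) := by
    rw [List.map_attach_eq_pmap]
    simp [List.pmap_eq_map]
  rw [this]

theorem minfold_le (c : Int) (cs : List Int) (y : Int) (hy : y ∈ c :: cs) : cs.foldl min c ≤ y := by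
  rcases hy with _ | hy
  · exact (PySem.List.foldl_min_le cs c).1
  · exact (PySem.List.foldl_min_le cs c).2 y (by assumption)

theorem minfold_mem (c : Int) (cs : List Int) : cs.foldl min c ∈ c :: cs := by
  rcases PySem.List.foldl_min_mem cs c with h | h
  · simp [h]
  · simp [h]

theorem pvBest_le (spaths : List (List Int)) (e : Int) :
    ∀ (N : Nat) (rem : List Int), rem.length ≤ N → ∀ (prev : Int) (p : List Int),
      p.Perm rem → pvBest spaths e prev rem ≤ costFn spaths e prev p := by
  intro N
  induction N with
  | zero =>
    intro rem hlen prev p hp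
    have : rem = [] := by cases rem <;> simp_all
    subst this
    have : p = [] := hp.eq_nil
    subst this
    simp [pvBest, costFn]
  | succ N ih =>
    intro rem hlen prev p hp
    match rem, p with
    | [], p =>
      have : p = [] := hp.eq_nil
      subst this; simp [pvBest, costFn]
    | x :: t, [] => exact absurd hp.length_eq (by simp)
    | x :: t, b :: p' =>
      obtain ⟨r, hr, hrp⟩ := pvSplits_complete hp
      rw [pvBest_cons]
      have hne := pvSplits_ne_nil x t
      rcases hm : (pvSplits (x :: t)).map
          (fun p => pvAt spaths prev (p.1 + 1) + pvBest spaths e (p.1 + 1) p.2) with _ | ⟨c, cs⟩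
      · exact absurd (List.map_eq_nil_iff.mp hm) hne
      · rw [hm]
        have hcand : pvAt spaths prev (b + 1) + pvBest spaths e (b + 1) r ∈ c :: cs := by
          rw [← hm]
          exact List.mem_map.mpr ⟨(b, r), hr, rfl⟩
        have h1 := minfold_le c cs _ hcand
        have hrlen : r.length ≤ N := by
          have h3 := pvSplits_length hr
          simp only [List.length_cons] at hlen h3
          omega
        have h2 := ih r hrlen (b + 1) p' hrp.symm
        show cs.foldl min c ≤ costFn spaths e prev (b :: p')
        have h4 : costFn spaths e prev (b :: p')
            = pvAt spaths prev (b + 1) + costFn spaths e (b + 1) p' := rfl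
        omega

theorem pvBest_exists (spaths : List (List Int)) (e : Int) :
    ∀ (N : Nat) (rem : List Int), rem.length ≤ N → ∀ (prev : Int),
      ∃ p, p.Perm rem ∧ costFn spaths e prev p = pvBest spaths e prev rem := by
  intro N
  induction N with
  | zero =>
    intro rem hlen prev
    have : rem = [] := by cases rem <;> simp_all
    subst this
    exact ⟨[], List.Perm.refl _, by simp [pvBest, costFn]⟩
  | succ N ih =>
    intro rem hlen prev
    match rem with
    | [] => exact ⟨[], List.Perm.refl _, by simp [pvBest, costFn]⟩
    | x :: t =>
      rw [pvBest_cons]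
      have hne := pvSplits_ne_nil x t
      rcases hm : (pvSplits (x :: t)).map
          (fun p => pvAt spaths prev (p.1 + 1) + pvBest spaths e (p.1 + 1) p.2) with _ | ⟨c, cs⟩
      · exact absurd (List.map_eq_nil_iff.mp hm) hne
      · rw [hm]
        have hmem := minfold_mem c cs
        rw [← hm] at hmem
        obtain ⟨⟨b, r⟩, hbr, hval⟩ := List.mem_map.mp hmem
        have hrlen : r.length ≤ N := by
          have h3 := pvSplits_length hbr
          simp only [List.length_cons] at hlen h3
          omega
        obtain ⟨p', hp', hc'⟩ := ih r hrlen (b + 1)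
        refine ⟨b :: p', ?_, ?_⟩
        · exact (hp'.cons b).trans (pvSplits_cons_perm hbr)
        · show pvAt spaths prev (b + 1) + costFn spaths e (b + 1) p' = _
          rw [hc', hval]

theorem mem_permutations_of_perm : ∀ {sub p : List Int}, p.Perm sub → p ∈ PySem.List.permutations sub sub.length := by
  intro sub p
  induction p generalizing sub with
  | nil =>
    intro h
    have : sub = [] := h.symm.eq_nil
    subst this
    simp [PySem.List.permutations_zero]
  | cons b p' ih =>
    intro h
    have hb : b ∈ sub := h.mem_iff.mp (by simp)
    obtain ⟨i, hi, hib⟩ := List.mem_iff_getElem.mp hb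
    have hlen : sub.length = p'.length + 1 := by
      have := h.length_eq; simp at this; omega
    rw [hlen, PySem.List.permutations_succ, List.mem_flatMap]
    refine ⟨i, by simp [hlen] at hi ⊢; omega, ?_⟩
    have hget : sub[i]? = some b := by
      rw [List.getElem?_eq_getElem hi, hib]
    rw [hget]
    simp only [List.mem_map]
    refine ⟨p', ?_, rfl⟩
    have hdec : sub = sub.take i ++ b :: sub.drop (i + 1) := by
      conv_lhs => rw [← List.take_append_drop i sub]
      rw [← List.getElem_cons_drop hi, hib]
    have hperm : p'.Perm (sub.eraseIdx i) := by
      rw [List.eraseIdx_eq_take_drop_succ]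
      have h2 : (b :: p').Perm (b :: (sub.take i ++ sub.drop (i + 1))) :=
        (hdec ▸ h).trans List.perm_middle
      exact h2.cons_inv
    have hlen2 : (sub.eraseIdx i).length = p'.length := by
      rw [List.length_eraseIdx_of_lt hi]; omega
    rw [← hlen2]
    exact ih hperm

-- feasibility as A computes it equals feasibility as B computes it
theorem feas_iff (spaths : List (List Int)) (tl L : Int) (sub : List Int) :
    (∃ p ∈ PySem.List.permutations sub sub.length, costFn spaths (L - 1) 0 p ≤ tl)
      ↔ pvBest spaths (L - 1) 0 sub ≤ tl := by
  constructor
  · rintro ⟨p, hp, hle⟩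
    exact le_trans (pvBest_le spaths (L - 1) sub.length sub le_rfl 0 p (PySem.List.perm_of_mem_permutations hp)) hle
  · intro h
    obtain ⟨p, hperm, hcost⟩ := pvBest_exists spaths (L - 1) sub.length sub le_rfl 0
    exact ⟨p, mem_permutations_of_perm hperm, by omega⟩

theorem permLoop_eq (spaths : List (List Int)) (tl L n : Int) (sub : List Int) :
    ∀ (ps : List (List Int)) (acc : List Int),
      permLoop spaths tl L n sub acc ps
        = if (∃ p ∈ ps, costFn spaths (L - 1) 0 p ≤ tl) ∧ acc.length < sub.length then sub else acc := by
  intro ps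
  induction ps with
  | nil => intro acc; simp [permLoop]
  | cons p ps ih =>
    intro acc
    show (if (p.foldl _ (0, 0)).1 + pvAt spaths (p.foldl _ (0, 0)).2 (L - 1) ≤ tl ∧ acc.length < sub.length then _ else _) = _
    rw [foldcost]
    by_cases hcost : costFn spaths (L - 1) 0 p ≤ tl
    · by_cases hlt : acc.length < sub.length
      · rw [if_pos (⟨⟨p, by simp, hcost⟩, hlt⟩ :
          (∃ q ∈ p :: ps, costFn spaths (L - 1) 0 q ≤ tl) ∧ acc.length < sub.length)]
        rw [if_pos (show (0:Int) + costFn spaths (L - 1) 0 p ≤ tl ∧ acc.length < sub.length from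
          ⟨by omega, hlt⟩)]
        by_cases hn : (sub.length : Int) = n
        · rw [if_pos hn]
        · rw [if_neg hn, ih sub]
          simp
      · rw [if_neg (show ¬((0:Int) + costFn spaths (L - 1) 0 p ≤ tl ∧ acc.length < sub.length) from
            fun h => hlt h.2), ih acc]
        rw [if_neg (show ¬((∃ q ∈ ps, costFn spaths (L - 1) 0 q ≤ tl) ∧ acc.length < sub.length) from
            fun h => hlt h.2)]
        rw [if_neg (show ¬((∃ q ∈ p :: ps, costFn spaths (L - 1) 0 q ≤ tl) ∧ acc.length < sub.length) from
            fun h => hlt h.2)]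
    · rw [if_neg (show ¬((0:Int) + costFn spaths (L - 1) 0 p ≤ tl ∧ acc.length < sub.length) from
          fun h => by omega), ih acc]
      congr 1
      simp only [List.mem_cons, eq_iff_iff]
      constructor
      · rintro ⟨⟨q, hq, hcq⟩, hlt⟩; exact ⟨⟨q, Or.inr hq, hcq⟩, hlt⟩
      · rintro ⟨⟨q, hq | hq, hcq⟩, hlt⟩
        · subst hq; omega
        · exact ⟨⟨q, hq, hcq⟩, hlt⟩

-- generic fold lemmas for "update the accumulator when s is admissible and beats it"

theorem foldPick_stay {α : Type} (P : α → Prop) [DecidablePred P] (R : α → α → Prop) [DecidableRel R] :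
    ∀ (l : List α) (a0 : α), (∀ s ∈ l, P s → ¬ R s a0) →
      l.foldl (fun acc s => if P s ∧ R s acc then s else acc) a0 = a0 := by
  intro l
  induction l with
  | nil => intro a0 _; rfl
  | cons x t ih =>
    intro a0 h
    simp only [List.foldl_cons]
    rw [if_neg (by intro ⟨h1, h2⟩; exact h x (by simp) h1 h2)]
    exact ih a0 (fun s hs => h s (by simp [hs]))

theorem foldPick_reach {α : Type} (P : α → Prop) [DecidablePred P] (R : α → α → Prop) [DecidableRel R] (e : α) :
    ∀ (l : List α) (a0 : α), R e a0 → (∀ s ∈ l, P s → R e s) →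
      R e (l.foldl (fun acc s => if P s ∧ R s acc then s else acc) a0) := by
  intro l
  induction l with
  | nil => intro a0 h0 _; exact h0
  | cons x t ih =>
    intro a0 h0 h1
    simp only [List.foldl_cons]
    by_cases hc : P x ∧ R x a0
    · rw [if_pos hc]
      exact ih x (h1 x (by simp) hc.1) (fun s hs => h1 s (by simp [hs]))
    · rw [if_neg hc]
      exact ih a0 h0 (fun s hs => h1 s (by simp [hs]))

theorem foldPick_hits {α : Type} (P : α → Prop) [DecidablePred P] (R : α → α → Prop) [DecidableRel R]
    (l1 l2 : List α) (e a0 : α) (hPe : P e) (h0 : R e a0)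
    (h1 : ∀ s ∈ l1, P s → R e s) (h2 : ∀ s ∈ l2, P s → ¬ R s e) :
    (l1 ++ e :: l2).foldl (fun acc s => if P s ∧ R s acc then s else acc) a0 = e := by
  rw [List.foldl_append, List.foldl_cons]
  rw [if_pos ⟨hPe, foldPick_reach P R e l1 a0 h0 h1⟩]
  exact foldPick_stay P R l2 e h2

theorem foldPick_mem {α : Type} (P : α → Prop) [DecidablePred P] (R : α → α → Prop) [DecidableRel R] :
    ∀ (l : List α) (a0 : α),
      l.foldl (fun acc s => if P s ∧ R s acc then s else acc) a0 = a0
      ∨ (l.foldl (fun acc s => if P s ∧ R s acc then s else acc) a0 ∈ l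
          ∧ P (l.foldl (fun acc s => if P s ∧ R s acc then s else acc) a0)) := by
  intro l
  induction l with
  | nil => intro a0; exact Or.inl rfl
  | cons x t ih =>
    intro a0
    simp only [List.foldl_cons]
    by_cases hc : P x ∧ R x a0
    · rw [if_pos hc]
      rcases ih x with h | ⟨h, hP⟩
      · exact Or.inr ⟨by simp [h], by rw [h]; exact hc.1⟩
      · exact Or.inr ⟨by simp [h], hP⟩
    · rw [if_neg hc]
      rcases ih a0 with h | ⟨h, hP⟩
      · exact Or.inl h
      · exact Or.inr ⟨by simp [h], hP⟩

theorem foldPick_improve {α : Type} (P : α → Prop) [DecidablePred P] (R : α → α → Prop) [DecidableRel R]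
    (htrans : ∀ a b c, R a b → R b c → R a c) :
    ∀ (l : List α) (a0 : α),
      l.foldl (fun acc s => if P s ∧ R s acc then s else acc) a0 = a0
      ∨ R (l.foldl (fun acc s => if P s ∧ R s acc then s else acc) a0) a0 := by
  intro l
  induction l with
  | nil => intro a0; exact Or.inl rfl
  | cons x t ih =>
    intro a0
    simp only [List.foldl_cons]
    by_cases hc : P x ∧ R x a0
    · rw [if_pos hc]
      rcases ih x with h | h
      · exact Or.inr (by rw [h]; exact hc.2)
      · exact Or.inr (htrans _ _ _ h hc.2)
    · rw [if_neg hc]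
      exact ih a0

theorem foldPick_max {α : Type} (P : α → Prop) [DecidablePred P] (R : α → α → Prop) [DecidableRel R]
    (htrans : ∀ a b c, R a b → R b c → R a c) (hasymm : ∀ a b, R a b → ¬ R b a) :
    ∀ (l : List α) (a0 : α) (s : α), s ∈ l → P s →
      ¬ R s (l.foldl (fun acc s => if P s ∧ R s acc then s else acc) a0) := by
  intro l
  induction l with
  | nil => intro a0 s hs; simp at hs
  | cons x t ih =>
    intro a0 s hs hP hR
    simp only [List.foldl_cons] at hR
    rcases List.mem_cons.mp hs with rfl | hst
    · by_cases hc : P s ∧ R s a0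
      · rw [if_pos hc] at hR
        rcases foldPick_improve P R htrans t s with h | h
        · rw [h] at hR; exact hasymm s s hR hR
        · exact hasymm _ _ h hR
      · rw [if_neg hc] at hR
        have hns : ¬ R s a0 := fun h => hc ⟨hP, h⟩
        rcases foldPick_improve P R htrans t a0 with h | h
        · rw [h] at hR; exact hns hR
        · exact hns (htrans _ _ _ hR h)
    · by_cases hc : P x ∧ R x a0
      · rw [if_pos hc] at hR
        exact ih x s hst hP hR
      · rw [if_neg hc] at hR
        exact ih a0 s hst hP hR

-- the (size, then lexicographic) "beats" relation used by B is a strict order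
theorem btB_trans (a b c : List Int) :
    (a.length > b.length ∨ (a.length = b.length ∧ a < b)) →
    (b.length > c.length ∨ (b.length = c.length ∧ b < c)) →
    (a.length > c.length ∨ (a.length = c.length ∧ a < c)) := by
  rintro (h1 | ⟨h1, h1'⟩) (h2 | ⟨h2, h2'⟩)
  · exact Or.inl (by omega)
  · exact Or.inl (by omega)
  · exact Or.inl (by omega)
  · exact Or.inr ⟨by omega, lt_trans h1' h2'⟩

theorem btB_asymm (a b : List Int) :
    (a.length > b.length ∨ (a.length = b.length ∧ a < b)) →
    ¬ (b.length > a.length ∨ (b.length = a.length ∧ b < a)) := by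
  rintro (h1 | ⟨h1, h1'⟩) (h2 | ⟨h2, h2'⟩)
  · omega
  · omega
  · omega
  · exact absurd h2' (lt_asymm h1')

-- 'i & (1 << k)' is nonzero exactly when '(i >> k) & 1 == 1' (bit k of i)
theorem bit_cond (i k : Nat) : (((1 : Nat) <<< k) &&& i != 0) = ((i >>> k) &&& 1 == 1) := by
  rw [Nat.shiftLeft_eq, one_mul, Nat.and_comm, Nat.and_two_pow, Nat.and_one_is_mod]
  rcases h : i.testBit k with _ | _
  · rw [Nat.testBit_eq_decide_div_mod_eq] at h
    simp only [decide_eq_false_iff_not] at h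
    have : i >>> k % 2 = 0 := by
      rw [Nat.shiftRight_eq_div_pow]
      omega
    simp [this]
  · rw [Nat.testBit_eq_decide_div_mod_eq] at h
    simp only [decide_eq_true_eq] at h
    have : i >>> k % 2 = 1 := by
      rw [Nat.shiftRight_eq_div_pow]
      omega
    simp [this]

-- A's allSets over the bunny-id range enumerates exactly B's per-mask subsets, in mask order
theorem allSets_eq (n : Int) :
    allSets (PySem.List.pyRange 0 n 1) = (List.range (1 <<< n.toNat)).map (pvSubOf n) := by
  have hlen : (PySem.List.pyRange 0 n 1).length = n.toNat := by
    rw [PySem.List.length_pyRange_one]; omega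
  unfold allSets
  rw [hlen]
  refine List.map_congr_left ?_
  intro i _
  rw [PySem.List.pyRange_one]
  simp only [Int.sub_zero]
  rw [List.zip_map', List.filter_map, List.map_map]
  unfold pvSubOf
  rw [PySem.List.pyRange_one]
  simp only [Int.sub_zero]
  rw [List.filter_map]
  congr 1
  apply List.filter_congr
  intro k _
  simp only [Function.comp_apply]
  rw [bit_cond]
  norm_num

theorem mem_pvSubOf (n : Int) (i : Nat) (b : Int) :
    b ∈ pvSubOf n i ↔ 0 ≤ b ∧ b < n ∧ i.testBit b.toNat := by
  unfold pvSubOf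
  rw [List.mem_filter, PySem.List.mem_pyRange_one]
  constructor
  · rintro ⟨⟨h0, h1⟩, hc⟩
    refine ⟨h0, h1, ?_⟩
    rw [Nat.testBit_eq_decide_div_mod_eq]
    simp only [Nat.and_one_is_mod, beq_iff_eq] at hc
    rw [Nat.shiftRight_eq_div_pow] at hc
    simp [hc]
  · rintro ⟨h0, h1, hb⟩
    refine ⟨⟨h0, h1⟩, ?_⟩
    rw [Nat.testBit_eq_decide_div_mod_eq] at hb
    simp only [decide_eq_true_eq] at hb
    simp only [Nat.and_one_is_mod, beq_iff_eq]
    rw [Nat.shiftRight_eq_div_pow]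
    exact hb

theorem pvSubOf_nodup (n : Int) :
    ((List.range (1 <<< n.toNat)).map (pvSubOf n)).Nodup := by
  refine List.Nodup.map_on ?_ (List.nodup_range)
  intro i hi j hj hij
  apply Nat.eq_of_testBit_eq
  intro k
  by_cases hk : (k : Int) < n
  · have h1 := mem_pvSubOf n i (k : Int)
    have h2 := mem_pvSubOf n j (k : Int)
    rw [hij] at h1
    simp only [Int.toNat_natCast] at h1 h2
    by_cases ht : j.testBit k
    · rw [ht, (h2.mpr ⟨by positivity, hk, ht⟩ |> h1.mp).2.2]
    · rcases hb : i.testBit k with _ | _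
      · simp [ht]
      · exact absurd (h1.mpr ⟨by positivity, hk, by rw [hb]⟩ |> h2.mp).2.2 ht
  · have hkn : n.toNat ≤ k := by omega
    have hpow : (2:Nat) ^ n.toNat ≤ 2 ^ k := Nat.pow_le_pow_right (by omega) hkn
    rw [List.mem_range, Nat.shiftLeft_eq, one_mul] at hi hj
    rw [Nat.testBit_eq_false_of_lt (by omega), Nat.testBit_eq_false_of_lt (by omega)]

-- the two (defeq) order instances on List Int, aligned so the library sorted lemmas apply
theorem sorted_bridge (xs : List (List Int)) (key : List Int → List Int) (rev : Bool) :
    @PySem.List.sorted (List Int) (List Int) List.instLT (fun a b => a.decidableLT b) xs key rev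
      = @PySem.List.sorted (List Int) (List Int) List.instLinearOrder.toLT
          LinearOrder.toDecidableLT xs key rev := by
  congr 1

theorem alt_eq (matrix spaths : List (List Int)) (tl : Int)
    (hn : ¬ ((matrix.length : Int) - 2 ≤ 0)) :
    find_most_bunnies_alt matrix spaths tl
      = (((List.range (1 <<< ((matrix.length : Int) - 2).toNat)).map (pvSubOf ((matrix.length : Int) - 2))).foldl
          (fun best sub =>
            if pvBest spaths ((matrix.length : Int) - 1) 0 sub ≤ tl ∧
                (sub.length > best.length ∨ (sub.length = best.length ∧ sub < best))
            then sub else best) []) := by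
  unfold find_most_bunnies_alt
  rw [if_neg hn, List.foldl_map]

theorem a_eq (matrix spaths : List (List Int)) (tl : Int) :
    find_most_bunnies matrix spaths tl
      = (PySem.List.sorted (allSets (PySem.List.pyRange 0 ((matrix.length : Int) - 2) 1)) (fun s => s)).foldl
          (fun acc sub =>
            if pvBest spaths ((matrix.length : Int) - 1) 0 sub ≤ tl ∧ acc.length < sub.length
            then sub else acc) [] := by
  unfold find_most_bunnies
  simp only [PySem.List.foldl_append_singleton_eq_self, List.nil_append]
  congr 1
  funext acc sub
  rw [permLoop_eq]
  exact if_congr (and_congr_left' (feas_iff spaths tl (matrix.length : Int) sub)) rfl rfl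

theorem find_most_bunnies_spec' : ∀ (matrix spaths : List (List Int)) (time_limit : Int),
    find_most_bunnies matrix spaths time_limit = find_most_bunnies_alt matrix spaths time_limit := by
  intro matrix spaths tl
  by_cases hn : ((matrix.length : Int) - 2 ≤ 0)
  · -- no bunnies: both sides return []
    have hB : find_most_bunnies_alt matrix spaths tl = [] := by
      unfold find_most_bunnies_alt
      rw [if_pos hn]
    have hA : find_most_bunnies matrix spaths tl = [] := by
      rw [a_eq]
      rw [PySem.List.pyRange_one_eq_nil hn]
      have h1 : allSets [] = [[]] := rfl
      have h2 : PySem.List.sorted ([[]] : List (List Int)) (fun s => s) = [[]] :=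
        List.perm_singleton.mp (PySem.List.sorted_perm [[]] (fun s => s) false)
      rw [h1, h2]
      simp
    rw [hA, hB]
  · -- at least one bunny
    set n : Int := (matrix.length : Int) - 2 with hn_def
    set L : Int := (matrix.length : Int) with hL_def
    set P : List Int → Prop := fun sub => pvBest spaths (L - 1) 0 sub ≤ tl with hP_def
    set Bl : List (List Int) := (List.range (1 <<< n.toNat)).map (pvSubOf n) with hBl_def
    set r : List Int := Bl.foldl
      (fun best sub =>
        if P sub ∧ (sub.length > best.length ∨ (sub.length = best.length ∧ sub < best))
        then sub else best) [] with hr_def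
    have hB : find_most_bunnies_alt matrix spaths tl = r := alt_eq matrix spaths tl hn
    rw [hB, a_eq, allSets_eq, ← hBl_def, sorted_bridge]
    set S : List (List Int) :=
      @PySem.List.sorted (List Int) (List Int) List.instLinearOrder.toLT
        LinearOrder.toDecidableLT Bl (fun s => s) false with hS_def
    have hperm : S.Perm Bl := @PySem.List.sorted_perm (List Int) (List Int) List.instLinearOrder.toLT LinearOrder.toDecidableLT Bl (fun s => s) false
    have hpw : S.Pairwise (fun a b => a ≤ b) := PySem.List.sorted_pairwise Bl (fun s => s)
    -- facts about r from the generic fold lemmas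
    have hmax := foldPick_max P
      (fun s t => s.length > t.length ∨ (s.length = t.length ∧ s < t)) btB_trans btB_asymm Bl []
    have hmem := foldPick_mem P
      (fun s t => s.length > t.length ∨ (s.length = t.length ∧ s < t)) Bl []
    rw [← hr_def] at hmax hmem
    by_cases hre : r = []
    · -- nothing admissible beats []: A's fold also stays at []
      rw [hre]
      apply foldPick_stay
      intro s hs hPs
      have hsB : s ∈ Bl := hperm.mem_iff.mp hs
      have hnb := hmax s hsB hPs
      rw [hre] at hnb
      simp only [List.length_nil, gt_iff_lt] at hnb
      omega
    · rcases hmem with h | ⟨hrB, hrP⟩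
      · exact absurd h hre
      have hrA : r ∈ S := hperm.mem_iff.mpr hrB
      obtain ⟨l1, l2, hsplit⟩ := List.append_of_mem hrA
      have hnd : S.Nodup := hperm.nodup_iff.mpr (pvSubOf_nodup n)
      rw [hsplit] at hnd hpw ⊢
      have hrl1 : r ∉ l1 := by
        rw [List.nodup_append] at hnd
        exact fun hmem1 => hnd.2.2 r hmem1 r (by simp) rfl
      apply foldPick_hits
      · exact hrP
      · simp only [List.length_nil]
        exact List.length_pos_of_ne_nil hre
      · intro s hs1 hPs
        have hsB : s ∈ Bl := hperm.mem_iff.mp (hsplit ▸ (by simp [hs1] : s ∈ l1 ++ r :: l2))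
        have hnb := hmax s hsB hPs
        have hle : s ≤ r := (List.pairwise_append.mp hpw).2.2 s hs1 r (by simp)
        have hne : s ≠ r := fun h => hrl1 (h ▸ hs1)
        have hlt : s < r := lt_of_le_of_ne hle hne
        by_contra hcon
        push Not at hcon
        exact hnb (Or.inr ⟨by omega, hlt⟩)
      · intro s hs2 hPs
        have hsB : s ∈ Bl := hperm.mem_iff.mp (hsplit ▸ (by simp [hs2] : s ∈ l1 ++ r :: l2))
        have hnb := hmax s hsB hPs
        intro hcon
        exact hnb (Or.inl hcon)

-- ===== VERDICT (by name: the statement is the Claim_ definition above) =====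
theorem find_most_bunnies_spec : Claim_equal_find_most_bunnies := by
  intro matrix spaths time_limit _ _
  exact find_most_bunnies_spec' matrix spaths time_limit
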